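-- pv_equiv track=rewrite | github.com/Polyxide/LeetCode | kuy8/pickaxe.py | stone_pick
-- ===== SOURCE A (Python) =====
-- def stone_pick(arr):
--
--     sticks_counter = 0
--     stones_counter = 0
--     result = 0
--
--     for x in arr:
--
--         if x == 'Sticks':
--             sticks_counter += 1
--
--         elif x == 'Cobblestone':
--             stones_counter += 1
--
--         elif x == 'Wood':
--             sticks_counter += 4
--
--         else:
--             pass
--
--     while sticks_counter >= 2 and stones_counter >= 3:
--         result += 1
--         sticks_counter -= 2
--         stones_counter -= 3
--
--     return result
-- ===== SOURCE B (Python) =====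
-- def stone_pick(arr):
--     sticks = arr.count('Sticks') + 4 * arr.count('Wood')
--     stones = arr.count('Cobblestone')
--     return min(sticks // 2, stones // 3)
-- ===== Notes on version B (the rewrite author's own statement) =====
-- stated objective: simpler
-- what changed: Replaces the if-chain counting loop with list.count tallies and the repeated-subtraction while loop with the closed form min(sticks // 2, stones // 3).
import Mathlib
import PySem

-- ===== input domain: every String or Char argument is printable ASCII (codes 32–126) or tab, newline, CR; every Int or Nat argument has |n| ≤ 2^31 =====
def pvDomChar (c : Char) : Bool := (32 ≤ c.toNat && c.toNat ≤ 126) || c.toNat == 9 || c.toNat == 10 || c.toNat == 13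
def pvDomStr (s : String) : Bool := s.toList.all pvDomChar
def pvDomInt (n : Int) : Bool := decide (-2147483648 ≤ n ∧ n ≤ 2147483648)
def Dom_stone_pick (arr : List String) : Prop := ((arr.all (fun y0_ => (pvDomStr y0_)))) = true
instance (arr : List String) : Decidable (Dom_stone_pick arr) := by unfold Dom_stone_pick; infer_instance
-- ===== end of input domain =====

-- B replaces A's if-chain counting loop and repeated-subtraction while loop by list.count
-- tallies and the closed form min(sticks // 2, stones // 3); objective: simpler.

-- ===== PORT A =====
-- the while loop: while sticks >= 2 and stones >= 3: result += 1; sticks -= 2; stones -= 3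
def stone_pick_while (result sticks stones : Int) : Int :=
  if sticks ≥ 2 ∧ stones ≥ 3 then
    stone_pick_while (result + 1) (sticks - 2) (stones - 3)
  else result
termination_by stones.toNat
decreasing_by omega

def stone_pick (arr : List String) : Int :=
  -- the for loop accumulates (sticks_counter, stones_counter)
  let counters := arr.foldl (fun (st : Int × Int) x =>
    if x == "Sticks" then (st.1 + 1, st.2)
    else if x == "Cobblestone" then (st.1, st.2 + 1)
    else if x == "Wood" then (st.1 + 4, st.2)
    else st) (0, 0)
  stone_pick_while 0 counters.1 counters.2

-- ===== PORT B =====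
def stone_pick_alt (arr : List String) : Int :=
  let sticks : Int := (PySem.List.count arr "Sticks" : Int) + 4 * (PySem.List.count arr "Wood" : Int)
  let stones : Int := (PySem.List.count arr "Cobblestone" : Int)
  min (PySem.Int.floordiv sticks 2) (PySem.Int.floordiv stones 3)

-- ===== PRECONDITION & SPEC =====
def Spec_stone_pick (arr : List String) (out : Int) : Prop := out = stone_pick_alt arr
instance (arr : List String) (out : Int) : Decidable (Spec_stone_pick arr out) := by unfold Spec_stone_pick; infer_instance

-- ===== CLAIM (what is proved, stated in full; the proofs are below) =====
def Claim_equal_stone_pick : Prop := ∀ (arr : List String), Dom_stone_pick arr → Spec_stone_pick arr (stone_pick arr)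

-- ===== LEMMAS AND PROOFS =====

-- A's while loop in closed form (for nonnegative counters).
theorem stone_pick_while_closed (result sticks stones : Int) (hs : 0 ≤ sticks) (ht : 0 ≤ stones) :
    stone_pick_while result sticks stones =
      result + min (PySem.Int.floordiv sticks 2) (PySem.Int.floordiv stones 3) := by
  fun_induction stone_pick_while result sticks stones with
  | case1 r s t h ih =>
    rw [ih (by omega) (by omega)]
    rw [PySem.Int.floordiv_eq_ediv_of_pos (a := s) (by omega),
        PySem.Int.floordiv_eq_ediv_of_pos (a := t) (by omega),
        PySem.Int.floordiv_eq_ediv_of_pos (a := s - 2) (by omega),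
        PySem.Int.floordiv_eq_ediv_of_pos (a := t - 3) (by omega)]
    omega
  | case2 r s t h =>
    rw [PySem.Int.floordiv_eq_ediv_of_pos (a := s) (by omega),
        PySem.Int.floordiv_eq_ediv_of_pos (a := t) (by omega)]
    omega

-- A's counting fold computes the counts of the three relevant strings.
theorem stone_pick_fold_counts (arr : List String) (s t : Int) :
    arr.foldl (fun (st : Int × Int) x =>
      if x == "Sticks" then (st.1 + 1, st.2)
      else if x == "Cobblestone" then (st.1, st.2 + 1)
      else if x == "Wood" then (st.1 + 4, st.2)
      else st) (s, t) =
    (s + (List.count "Sticks" arr : Int) + 4 * (List.count "Wood" arr : Int),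
     t + (List.count "Cobblestone" arr : Int)) := by
  induction arr generalizing s t with
  | nil => simp
  | cons x xs ih =>
    simp only [List.foldl_cons, List.count_cons, beq_iff_eq]
    by_cases h1 : x = "Sticks" <;> by_cases h2 : x = "Cobblestone" <;> by_cases h3 : x = "Wood" <;>
      simp_all [Prod.ext_iff] <;> omega

-- ===== VERDICT (by name: the statement is the Claim_ definition above) =====
theorem stone_pick_spec : Claim_equal_stone_pick := by
  intro arr _
  show stone_pick arr = stone_pick_alt arr
  unfold stone_pick stone_pick_alt
  rw [stone_pick_fold_counts arr 0 0]
  simp only [PySem.List.count_eq]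
  rw [stone_pick_while_closed _ _ _ (by positivity) (by positivity)]
  ring_nf
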